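-- pv_equiv track=rewrite | github.com/Ferrari25/ParserASDPpy | Automatas.py | automata_opmult
-- ===== SOURCE A (Python) =====
-- ESTADO_FINAL = "ESTADO FINAL"
--
-- ESTADO_NO_FINAL = "NO ACEPTADO"
--
-- ESTADO_TRAMPA = "EN ESTADO TRAMPA"
--
-- def automata_opmult(lexema):
--         estadoactual=0
--         estadosfinales=[1]
--         for vcarac in lexema:
--             if estadoactual==0 and (vcarac=='*' or vcarac=='/'):
--                 estadoactual=1
--             else:
--                 estadoactual=-1
--                 break
--         if estadoactual==-1:
--             return ESTADO_TRAMPA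
--         if estadoactual in estadosfinales:
--              return ESTADO_FINAL
--         else:
--              return ESTADO_NO_FINAL
-- ===== SOURCE B (Python) =====
-- ESTADO_FINAL = "ESTADO FINAL"
-- ESTADO_NO_FINAL = "NO ACEPTADO"
-- ESTADO_TRAMPA = "EN ESTADO TRAMPA"
--
-- def automata_opmult(lexema):
--     n = len(lexema)
--     if n == 0:
--         return ESTADO_NO_FINAL
--     if n == 1 and lexema[0] in ('*', '/'):
--         return ESTADO_FINAL
--     return ESTADO_TRAMPA
-- ===== Notes on version B (the rewrite author's own statement) =====
-- stated objective: simpler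
-- what changed: Replaces the per-character DFA state loop with a constant-time closed-form classification on the lexeme length and first character.
import Mathlib
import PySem

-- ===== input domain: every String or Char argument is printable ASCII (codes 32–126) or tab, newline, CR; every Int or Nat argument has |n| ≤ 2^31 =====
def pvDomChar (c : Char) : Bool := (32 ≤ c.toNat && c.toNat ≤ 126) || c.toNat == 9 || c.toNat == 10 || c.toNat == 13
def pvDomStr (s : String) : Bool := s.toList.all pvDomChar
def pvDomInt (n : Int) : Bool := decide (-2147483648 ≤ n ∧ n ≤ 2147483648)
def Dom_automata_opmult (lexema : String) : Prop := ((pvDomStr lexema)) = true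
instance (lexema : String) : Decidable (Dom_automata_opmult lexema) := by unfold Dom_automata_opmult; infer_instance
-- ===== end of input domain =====

-- B replaces the per-character DFA loop with a constant-time closed-form check on length and first char (objective: simpler).

-- ===== PORT A =====
-- the for-loop with break: state 0 advances to 1 on '*'/'/', anything else traps (-1) and breaks
def automata_opmult_loop (estadoactual : Int) (cs : List Char) : Int :=
  match cs with
  | [] => estadoactual
  | vcarac :: rest =>
      if estadoactual == 0 && (vcarac == '*' || vcarac == '/') then
        automata_opmult_loop 1 rest
      else
        -1

def automata_opmult (lexema : String) : String :=
  let estadosfinales : List Int := [1]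
  let estadoactual := automata_opmult_loop 0 lexema.toList
  if estadoactual == -1 then "EN ESTADO TRAMPA"
  else if estadosfinales.contains estadoactual then "ESTADO FINAL"
  else "NO ACEPTADO"

-- ===== PORT B =====
def automata_opmult_alt (lexema : String) : String :=
  match lexema.toList with
  | [] => "NO ACEPTADO"
  | [c] => if c == '*' || c == '/' then "ESTADO FINAL" else "EN ESTADO TRAMPA"
  | _ => "EN ESTADO TRAMPA"

-- ===== PRECONDITION & SPEC =====
def Spec_automata_opmult (lexema : String) (out : String) : Prop := out = automata_opmult_alt lexema
instance (lexema : String) (out : String) : Decidable (Spec_automata_opmult lexema out) := by unfold Spec_automata_opmult; infer_instance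

-- ===== CLAIM (what is proved, stated in full; the proofs are below) =====
def Claim_equal_automata_opmult : Prop := ∀ (lexema : String), Dom_automata_opmult lexema → Spec_automata_opmult lexema (automata_opmult lexema)

-- ===== LEMMAS AND PROOFS =====
-- ===== VERDICT (by name: the statement is the Claim_ definition above) =====
theorem automata_opmult_spec : Claim_equal_automata_opmult := by
  intro lexema _
  unfold Spec_automata_opmult automata_opmult automata_opmult_alt
  cases h : lexema.toList with
  | nil => simp [automata_opmult_loop]
  | cons c rest =>
    cases rest with
    | nil =>
      by_cases hc : c = '*' ∨ c = '/' <;>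
        simp [automata_opmult_loop, hc]
    | cons d rest' =>
      by_cases hc : c = '*' ∨ c = '/' <;>
        simp [automata_opmult_loop, hc]
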